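-- pv_equiv track=rewrite | github.com/MrBrantCode/unitest_baseline | mut_generate/mist_train_cf/cf_19836/solution.py | copy_array
-- ===== SOURCE A (Python) =====
-- def copy_array(arr):
--     """
--     Creates a new array consisting of all odd numbers smaller than 5 from the input array.
--     The length of the new array should not exceed 5. If no such numbers exist, return an empty array.
--
--     Args:
--         arr (list): The input array.
--
--     Returns:
--         list: A new array consisting of odd numbers smaller than 5 from the input array.
--     """
--     # Base case: if the input array is empty, return an empty array
--     if len(arr) == 0:
--         return []
--
--     # Recursive case: check if the first element is smaller than 5 and odd
--     if arr[0] < 5 and arr[0] % 2 != 0: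
--         # Create a new array by concatenating the first element with the result of the recursive call on the rest of the array
--         result = [arr[0]] + copy_array(arr[1:])
--         # Limit the length of the new array to 5
--         return result[:5]
--     else:
--         # Return the result of the recursive call on the rest of the array
--         return copy_array(arr[1:])
-- ===== SOURCE B (Python) =====
-- def copy_array(arr):
--     """Single linear pass collecting up to 5 odd numbers smaller than 5 (early exit)."""
--     out = []
--     for x in arr:
--         if x < 5 and x % 2 != 0:
--             out.append(x)
--             if len(out) == 5:
--                 break
--     return out
-- ===== Notes on version B (the rewrite author's own statement) =====
-- stated objective: faster
-- what changed: Replaced the recursion with per-level list slicing/concatenation/truncation by a single iterative pass that appends qualifying elements and stops as soon as 5 are collected.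
import Mathlib
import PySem

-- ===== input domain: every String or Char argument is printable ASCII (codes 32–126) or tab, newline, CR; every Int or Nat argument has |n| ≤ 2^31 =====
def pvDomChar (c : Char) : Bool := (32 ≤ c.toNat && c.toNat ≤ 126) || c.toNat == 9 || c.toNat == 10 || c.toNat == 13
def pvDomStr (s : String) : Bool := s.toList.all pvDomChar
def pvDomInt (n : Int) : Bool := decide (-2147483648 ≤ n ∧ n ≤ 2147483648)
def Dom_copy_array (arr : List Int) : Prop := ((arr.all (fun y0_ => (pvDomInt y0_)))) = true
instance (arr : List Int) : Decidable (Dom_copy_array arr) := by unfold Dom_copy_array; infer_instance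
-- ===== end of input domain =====

-- B changes the algorithm: one linear pass with an accumulator and early stop at 5
-- instead of A's recursion with per-level concatenation and re-truncation (faster).

-- ===== PORT A =====
-- literal transliteration of A's recursion: test head, cons + take 5, recurse on tail
def copy_array : List Int → List Int
  | [] => []
  | x :: rest =>
    if x < 5 ∧ PySem.Int.mod x 2 ≠ 0 then
      (x :: copy_array rest).take 5
    else
      copy_array rest

-- ===== PORT B =====
-- the for-loop of Source B: accumulator (reversed), break when 5 collected
def copyArrayAltGo : List Int → List Int → List Int
  | [], acc => acc.reverse
  | x :: rest, acc =>
    if x < 5 ∧ PySem.Int.mod x 2 ≠ 0 then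
      if acc.length + 1 = 5 then (x :: acc).reverse
      else copyArrayAltGo rest (x :: acc)
    else copyArrayAltGo rest acc

def copy_array_alt (arr : List Int) : List Int := copyArrayAltGo arr []

-- ===== PRECONDITION & SPEC =====
def Spec_copy_array (arr : List Int) (out : List Int) : Prop := out = copy_array_alt arr
instance (arr : List Int) (out : List Int) : Decidable (Spec_copy_array arr out) := by unfold Spec_copy_array; infer_instance

-- ===== CLAIM (what is proved, stated in full; the proofs are below) =====
def Claim_equal_copy_array : Prop := ∀ (arr : List Int), Dom_copy_array arr → Spec_copy_array arr (copy_array arr)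

-- ===== LEMMAS AND PROOFS =====

-- the shared qualifying test, as a Bool predicate (proof-side abbreviation only)
def pvOdd5 (x : Int) : Bool := decide (x < 5 ∧ PySem.Int.mod x 2 ≠ 0)

-- A computes the first 5 qualifying elements: copy_array arr = (filter pvOdd5 arr).take 5
theorem copy_array_eq_filter_take (arr : List Int) :
    copy_array arr = (arr.filter pvOdd5).take 5 := by
  induction arr with
  | nil => rfl
  | cons x rest ih =>
    cases hx : pvOdd5 x with
    | true =>
      have hp : x < 5 ∧ PySem.Int.mod x 2 ≠ 0 := of_decide_eq_true (by unfold pvOdd5 at hx; exact hx)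
      simp only [copy_array]
      rw [if_pos hp, ih, List.filter_cons_of_pos hx]
      simp [List.take_succ_cons, List.take_take]
    | false =>
      have hp : ¬(x < 5 ∧ PySem.Int.mod x 2 ≠ 0) := of_decide_eq_false (by unfold pvOdd5 at hx; exact hx)
      simp only [copy_array]
      rw [if_neg hp, ih, List.filter_cons_of_neg (by simp [hx])]

-- loop invariant for B's pass
theorem copyArrayAltGo_spec (arr : List Int) : ∀ (acc : List Int), acc.length < 5 →
    copyArrayAltGo arr acc = acc.reverse ++ ((arr.filter pvOdd5).take (5 - acc.length)) := by
  induction arr with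
  | nil => intro acc _; simp [copyArrayAltGo]
  | cons x rest ih =>
    intro acc hlen
    cases hx : pvOdd5 x with
    | true =>
      have hp : x < 5 ∧ PySem.Int.mod x 2 ≠ 0 := of_decide_eq_true (by unfold pvOdd5 at hx; exact hx)
      simp only [copyArrayAltGo]
      rw [if_pos hp, List.filter_cons_of_pos hx]
      by_cases hfull : acc.length + 1 = 5
      · have h1 : 5 - acc.length = 1 := by omega
        rw [if_pos hfull, h1]
        simp
      · have hlt : (x :: acc).length < 5 := by simp; omega
        have h2 : 5 - acc.length = (5 - (acc.length + 1)) + 1 := by omega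
        rw [if_neg hfull, ih _ hlt, h2]
        simp [List.take_succ_cons]
    | false =>
      have hp : ¬(x < 5 ∧ PySem.Int.mod x 2 ≠ 0) := of_decide_eq_false (by unfold pvOdd5 at hx; exact hx)
      simp only [copyArrayAltGo]
      rw [if_neg hp, List.filter_cons_of_neg (by simp [hx]), ih _ hlen]

-- ===== VERDICT (by name: the statement is the Claim_ definition above) =====
theorem copy_array_spec : Claim_equal_copy_array := by
  intro arr _
  unfold Spec_copy_array copy_array_alt
  rw [copy_array_eq_filter_take, copyArrayAltGo_spec arr [] (by simp)]
  simp
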